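-- pv_equiv track=rewrite | github.com/siisi1324/RealSSAFY | practice/string/0212_str2/huemun.py | solve
-- ===== SOURCE A (Python) =====
-- def solve(txt, n):
--     cnt = 0
--     for i in range(8):
--         for j in range(8-n+1): # 회문을 확인하는 구간의 첫 글자 인덱스
--             for k in range(n//2): # 회문의 길이 절반만큼 비교
--                 if txt[i][j+k] != txt[i][j+n-1-k]:
--                     break # 비교 글자가 다르면 현재구간 중지
--             else:
--                 cnt+=1
--     return cnt
-- ===== SOURCE B (Python) =====
-- def solve(txt, n):
--     # windows of width < 2 are trivially palindromes: 8 rows * (9-n) windows each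
--     if n < 2:
--         return 8 * (9 - n)
--     # no window of width > 8 fits in a row
--     if n > 8:
--         return 0
--     return sum(1 for row in txt[:8] for j in range(9 - n)
--                if row[j:j+n] == row[j:j+n][::-1])
-- ===== Notes on version B (the rewrite author's own statement) =====
-- stated objective: simpler
-- what changed: Degenerate widths (n<2, n>8) are resolved up front by a closed form, and the remaining case is a single flat count over the list of row windows via slice-reverse-compare, replacing A's three nested index loops with early break.
import Mathlib
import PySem

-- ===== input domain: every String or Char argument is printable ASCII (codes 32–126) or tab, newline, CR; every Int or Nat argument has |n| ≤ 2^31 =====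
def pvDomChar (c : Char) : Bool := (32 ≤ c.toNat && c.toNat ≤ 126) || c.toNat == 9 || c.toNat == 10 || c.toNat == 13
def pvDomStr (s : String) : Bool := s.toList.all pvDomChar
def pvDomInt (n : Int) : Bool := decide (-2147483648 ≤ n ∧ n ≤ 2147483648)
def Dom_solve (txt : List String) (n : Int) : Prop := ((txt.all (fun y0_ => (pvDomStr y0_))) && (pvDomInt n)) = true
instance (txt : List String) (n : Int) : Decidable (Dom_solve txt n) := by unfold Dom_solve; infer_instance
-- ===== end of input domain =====

-- B resolves the degenerate widths (n<2, n>8) by a closed form up front and counts the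
-- remaining case as one flat count over the list of row windows, each tested by
-- slice-reverse-compare; objective: simpler.

-- ===== PORT A =====
def solve (txt : List String) (n : Int) : Int :=
  (PySem.List.pyRange 0 8 1).foldl (fun cnt i =>
    (PySem.List.pyRange 0 (8 - n + 1) 1).foldl (fun cnt j =>
      if (PySem.List.pyRange 0 (PySem.Int.floordiv n 2) 1).all (fun k =>
            PySem.Str.pyGet? ((PySem.List.pyGet? txt i).getD "") (j + k)
              == PySem.Str.pyGet? ((PySem.List.pyGet? txt i).getD "") (j + n - 1 - k))
      then cnt + 1 else cnt) cnt) 0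

-- ===== PORT B =====
def solve_alt (txt : List String) (n : Int) : Int :=
  if n < 2 then 8 * (9 - n)
  else if 8 < n then 0
  else
    (((PySem.List.slice txt none (some 8)).flatMap (fun row =>
        (PySem.List.pyRange 0 (9 - n) 1).map (fun j =>
          PySem.Str.slice row (some j) (some (j + n))))).countP
      (fun s => s == (PySem.Str.slice? s none none (-1)).getD s) : Int)

-- ===== PRECONDITION & SPEC =====
-- Pre_ excludes exactly the inputs on which A raises IndexError: those with 2 ≤ n ≤ 8 and
-- fewer than 8 rows, or one of the first 8 rows shorter than 8 characters (A always reaches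
-- character index 7 of each visited row there).
def Pre_solve (txt : List String) (n : Int) : Prop :=
  n ≤ 1 ∨ 9 ≤ n ∨ (8 ≤ txt.length ∧ ∀ row ∈ txt.take 8, 8 ≤ row.length)
instance (txt : List String) (n : Int) : Decidable (Pre_solve txt n) := by
  unfold Pre_solve; infer_instance
def pvWitness_solve : List String × Int :=
  (["abcbaaaa","aaaaaaaa","abcdefgh","zzzzzzzz","aaaaaaaa","aaaaaaaa","aaaaaaaa","aaaaaaaa"], 3)
def Spec_solve (txt : List String) (n : Int) (out : Int) : Prop := out = solve_alt txt n
instance (txt : List String) (n : Int) (out : Int) : Decidable (Spec_solve txt n out) := by unfold Spec_solve; infer_instance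

-- ===== CLAIM (what is proved, stated in full; the proofs are below) =====
def Claim_equal_solve : Prop := ∀ (txt : List String) (n : Int), Dom_solve txt n → Pre_solve txt n → Spec_solve txt n (solve txt n)

-- ===== LEMMAS AND PROOFS =====

-- B's test 's == s[::-1]' is the palindrome test on s.toList
lemma beq_rev_eq (s : String) :
    (s == (PySem.Str.slice? s none none (-1)).getD s) = decide (s.toList.reverse = s.toList) := by
  rw [PySem.Str.slice?_none_none_neg_one, Option.getD_some]
  show decide (s = String.ofList s.toList.reverse) = _
  apply decide_eq_decide.mpr
  rw [String.ext_iff]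
  simp [eq_comm]

-- A's half-window elementwise test over range(len t / 2) says exactly "t is a palindrome".
lemma palin_iff (t : List Char) :
    ((List.range (t.length / 2)).all (fun k => t[k]? == t[t.length - 1 - k]?) = true)
      ↔ t.reverse = t := by
  rw [List.all_eq_true]
  constructor
  · intro h
    apply List.ext_getElem?
    intro i
    by_cases hi : i < t.length
    · rw [List.getElem?_reverse hi]
      by_cases h2 : i < t.length / 2
      · have := h i (List.mem_range.mpr h2)
        simp only [beq_iff_eq] at this
        exact this.symm
      · by_cases h3 : t.length - 1 - i < t.length / 2
        · have := h _ (List.mem_range.mpr h3)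
          have hrw : t.length - 1 - (t.length - 1 - i) = i := by omega
          rw [hrw] at this
          simp only [beq_iff_eq] at this
          exact this
        · have : t.length - 1 - i = i := by omega
          rw [this]
    · have hle : t.length ≤ i := Nat.le_of_not_lt hi
      rw [List.getElem?_eq_none (by simpa using hle), List.getElem?_eq_none hle]
  · intro h k hk
    have hk' := List.mem_range.mp hk
    have hlt : k < t.length := by omega
    have := List.getElem?_reverse hlt
    rw [h] at this
    simpa using this

-- with n ≤ 1 the half-window loop of A is empty: its test is vacuously true
lemma cond_small_A (f : Int → Bool) (n : Int) (h1 : n ≤ 1) :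
    (PySem.List.pyRange 0 (PySem.Int.floordiv n 2) 1).all f = true := by
  have hz : PySem.Int.floordiv n 2 ≤ 0 := by
    rw [PySem.Int.floordiv_eq_ediv_of_pos (by norm_num)]; omega
  rw [PySem.List.pyRange_one_eq_nil hz]
  rfl

-- both window tests agree on an in-range window of width nn ≥ 2
lemma cond_eq_core (row : String) (jn nn : Nat) (hn : 2 ≤ nn)
    (hlen : jn + nn ≤ row.length) :
    ((PySem.List.pyRange 0 (PySem.Int.floordiv (nn : Int) 2) 1).all (fun k =>
        PySem.Str.pyGet? row ((jn : Int) + k)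
          == PySem.Str.pyGet? row ((jn : Int) + (nn : Int) - 1 - k)))
      = (PySem.Str.slice row (some (jn : Int)) (some ((jn : Int) + (nn : Int)))
          == (PySem.Str.slice? (PySem.Str.slice row (some (jn : Int)) (some ((jn : Int) + (nn : Int)))) none none (-1)).getD
               (PySem.Str.slice row (some (jn : Int)) (some ((jn : Int) + (nn : Int))))) := by
  have hrl : row.toList.length = row.length := String.length_toList
  have hs : (PySem.Str.slice row (some (jn : Int)) (some ((jn : Int) + (nn : Int)))).toList
      = (row.toList.drop jn).take nn := by
    rw [PySem.Str.toList_slice, PySem.Chars.slice_eq_listSlice]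
    exact PySem.List.slice_natCast_add row.toList jn nn
  set t : List Char := (row.toList.drop jn).take nn with ht
  have htl : t.length = nn := by
    simp only [ht, List.length_take, List.length_drop]
    omega
  have hfd : PySem.Int.floordiv (nn : Int) 2 = ((nn / 2 : Nat) : Int) := by
    rw [PySem.Int.floordiv_eq_ediv_of_pos (by norm_num)]
    omega
  have hget1 : ∀ kn : Nat, kn < nn → PySem.Str.pyGet? row ((jn : Int) + (kn : Int)) = t[kn]? := by
    intro kn hkn
    rw [show ((jn : Int) + (kn : Int)) = ((jn + kn : Nat) : Int) by push_cast; ring,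
        PySem.Str.pyGet?_natCast, ht, List.getElem?_take, if_pos hkn, List.getElem?_drop]
  have hget2 : ∀ kn : Nat, kn < nn →
      PySem.Str.pyGet? row ((jn : Int) + (nn : Int) - 1 - (kn : Int)) = t[nn - 1 - kn]? := by
    intro kn hkn
    rw [show ((jn : Int) + (nn : Int) - 1 - (kn : Int)) = ((jn + (nn - 1 - kn) : Nat) : Int) by omega,
        PySem.Str.pyGet?_natCast, ht, List.getElem?_take, if_pos (by omega), List.getElem?_drop]
  rw [beq_rev_eq, hs]
  apply Bool.eq_iff_iff.mpr
  rw [decide_eq_true_eq, ← palin_iff t]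
  simp only [List.all_eq_true]
  constructor
  · intro h k hk
    have hk2 : k < nn / 2 := by
      have := List.mem_range.mp hk
      omega
    have hm : ((k : Nat) : Int) ∈ PySem.List.pyRange 0 (PySem.Int.floordiv (nn : Int) 2) 1 :=
      PySem.List.mem_pyRange_one.mpr ⟨by positivity, by rw [hfd]; exact_mod_cast hk2⟩
    have hv := h _ hm
    rw [hget1 k (by omega), hget2 k (by omega)] at hv
    rw [htl]
    exact hv
  · intro h k hk
    obtain ⟨hk0, hklt⟩ := PySem.List.mem_pyRange_one.mp hk
    rw [hfd] at hklt
    obtain ⟨kn, rfl⟩ := Int.eq_ofNat_of_zero_le hk0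
    have hkn : kn < nn / 2 := by exact_mod_cast hklt
    have hv := h kn (List.mem_range.mpr (by omega))
    rw [htl] at hv
    rw [hget1 kn (by omega), hget2 kn (by omega)]
    exact hv

-- A's fold over one row equals the countP of B's window list for that row (2 ≤ n ≤ 8, full row)
lemma row_eq (row : String) (n : Int) (hn2 : 2 ≤ n) (hn8 : n ≤ 8)
    (hrow : 8 ≤ row.length) (c : Int) :
    (PySem.List.pyRange 0 (8 - n + 1) 1).foldl (fun cnt j =>
      if (PySem.List.pyRange 0 (PySem.Int.floordiv n 2) 1).all (fun k =>
            PySem.Str.pyGet? row (j + k) == PySem.Str.pyGet? row (j + n - 1 - k))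
      then cnt + 1 else cnt) c
    = c + (((PySem.List.pyRange 0 (9 - n) 1).map (fun j =>
          PySem.Str.slice row (some j) (some (j + n)))).countP
            (fun s => s == (PySem.Str.slice? s none none (-1)).getD s) : Int) := by
  rw [PySem.List.foldl_if_add_one, List.countP_map,
      show (8 : Int) - n + 1 = 9 - n by ring]
  have hcnt : (PySem.List.pyRange 0 (9 - n) 1).countP (fun j =>
        (PySem.List.pyRange 0 (PySem.Int.floordiv n 2) 1).all (fun k =>
          PySem.Str.pyGet? row (j + k) == PySem.Str.pyGet? row (j + n - 1 - k)))
      = (PySem.List.pyRange 0 (9 - n) 1).countP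
          ((fun s => s == (PySem.Str.slice? s none none (-1)).getD s) ∘ (fun j =>
            PySem.Str.slice row (some j) (some (j + n)))) := by
    apply List.countP_congr
    intro j hj
    obtain ⟨hj0, hjlt⟩ := PySem.List.mem_pyRange_one.mp hj
    have hcore := cond_eq_core row j.toNat n.toNat (by omega) (by omega)
    rw [show ((j.toNat : Nat) : Int) = j from Int.toNat_of_nonneg hj0,
        show ((n.toNat : Nat) : Int) = n from Int.toNat_of_nonneg (by omega)] at hcore
    simp only [Function.comp_apply]
    exact Bool.eq_iff_iff.mp hcore
  rw [hcnt]

-- ===== VERDICT (by name: the statement is the Claim_ definition above) =====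
theorem solve_spec : Claim_equal_solve := by
  unfold Claim_equal_solve
  intro txt n _ hpre
  unfold Spec_solve solve solve_alt
  by_cases h9 : 9 ≤ n
  · rw [if_neg (by omega), if_pos (by omega),
        PySem.List.pyRange_one_eq_nil (show (8 : Int) - n + 1 ≤ 0 by omega)]
    simp
  · by_cases hn1 : n ≤ 1
    · rw [if_pos (by omega)]
      have hin : ∀ (i c : Int),
          (PySem.List.pyRange 0 (8 - n + 1) 1).foldl (fun cnt j =>
            if (PySem.List.pyRange 0 (PySem.Int.floordiv n 2) 1).all (fun k =>
                  PySem.Str.pyGet? ((PySem.List.pyGet? txt i).getD "") (j + k)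
                    == PySem.Str.pyGet? ((PySem.List.pyGet? txt i).getD "") (j + n - 1 - k))
            then cnt + 1 else cnt) c = c + (9 - n) := by
        intro i c
        rw [PySem.List.foldl_if_add_one,
            List.countP_eq_length.mpr (fun j _ => cond_small_A _ n hn1),
            PySem.List.length_pyRange_one]
        omega
      rw [show PySem.List.pyRange 0 8 1 = [0,1,2,3,4,5,6,7] from by decide]
      simp only [List.foldl_cons, List.foldl_nil, hin]
      ring
    · have hn2 : 2 ≤ n := by omega
      obtain ⟨hlen8, hrows⟩ := (hpre.resolve_left hn1).resolve_left h9
      rw [if_neg (by omega), if_neg (by omega)]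
      rcases txt with _ | ⟨r0, txt⟩; · simp at hlen8
      rcases txt with _ | ⟨r1, txt⟩; · simp at hlen8
      rcases txt with _ | ⟨r2, txt⟩; · simp at hlen8
      rcases txt with _ | ⟨r3, txt⟩; · simp at hlen8
      rcases txt with _ | ⟨r4, txt⟩; · simp at hlen8
      rcases txt with _ | ⟨r5, txt⟩; · simp at hlen8
      rcases txt with _ | ⟨r6, txt⟩; · simp at hlen8
      rcases txt with _ | ⟨r7, rest⟩; · simp at hlen8
      have hr : ∀ m ∈ [r0,r1,r2,r3,r4,r5,r6,r7], 8 ≤ m.length := by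
        intro m hm
        apply hrows
        simp only [List.take, List.mem_cons] at hm ⊢
        tauto
      have e0 : (PySem.List.pyGet? (r0::r1::r2::r3::r4::r5::r6::r7::rest) (0:Int)).getD "" = r0 := by simp [pysem]
      have e1 : (PySem.List.pyGet? (r0::r1::r2::r3::r4::r5::r6::r7::rest) (1:Int)).getD "" = r1 := by simp [pysem]
      have e2 : (PySem.List.pyGet? (r0::r1::r2::r3::r4::r5::r6::r7::rest) (2:Int)).getD "" = r2 := by simp [pysem]
      have e3 : (PySem.List.pyGet? (r0::r1::r2::r3::r4::r5::r6::r7::rest) (3:Int)).getD "" = r3 := by simp [pysem]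
      have e4 : (PySem.List.pyGet? (r0::r1::r2::r3::r4::r5::r6::r7::rest) (4:Int)).getD "" = r4 := by simp [pysem]
      have e5 : (PySem.List.pyGet? (r0::r1::r2::r3::r4::r5::r6::r7::rest) (5:Int)).getD "" = r5 := by simp [pysem]
      have e6 : (PySem.List.pyGet? (r0::r1::r2::r3::r4::r5::r6::r7::rest) (6:Int)).getD "" = r6 := by simp [pysem]
      have e7 : (PySem.List.pyGet? (r0::r1::r2::r3::r4::r5::r6::r7::rest) (7:Int)).getD "" = r7 := by simp [pysem]
      have hsl : PySem.List.slice (r0::r1::r2::r3::r4::r5::r6::r7::rest) none (some 8)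
          = [r0,r1,r2,r3,r4,r5,r6,r7] := by
        rw [PySem.List.slice_to _ (show (0:Int) ≤ 8 by norm_num)]
        rfl
      rw [show PySem.List.pyRange 0 8 1 = [0,1,2,3,4,5,6,7] from by decide, hsl]
      simp only [List.foldl_cons, List.foldl_nil, e0, e1, e2, e3, e4, e5, e6, e7,
        List.flatMap_cons, List.flatMap_nil, List.countP_append,
        List.append_nil]
      rw [row_eq r0 n hn2 (by omega) (hr r0 (by simp)) 0,
          row_eq r1 n hn2 (by omega) (hr r1 (by simp)),
          row_eq r2 n hn2 (by omega) (hr r2 (by simp)),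
          row_eq r3 n hn2 (by omega) (hr r3 (by simp)),
          row_eq r4 n hn2 (by omega) (hr r4 (by simp)),
          row_eq r5 n hn2 (by omega) (hr r5 (by simp)),
          row_eq r6 n hn2 (by omega) (hr r6 (by simp)),
          row_eq r7 n hn2 (by omega) (hr r7 (by simp))]
      push_cast
      ring
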